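-- pv_equiv track=rewrite | github.com/cmejia5486/ugandaMike | scripts/vision360_generator.py | sort_paths_by_hints
-- ===== SOURCE A (Python) =====
-- from typing import Any, Dict, List, Tuple
--
-- def normalize_path(path: str) -> str:
--     return path.replace("\\", "/").lower()
--
-- def sort_paths_by_hints(paths: List[str], hints: List[str]) -> List[str]:
--     if not hints:
--         return sorted(paths)
--     hints_low = [h.lower() for h in hints]
--     preferred = []
--     other = []
--     for path in paths:
--         norm = normalize_path(path)
--         if any(h in norm for h in hints_low):
--             preferred.append(path)
--         else:
--             other.append(path)
--     return sorted(preferred) + sorted(other)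
-- ===== SOURCE B (Python) =====
-- def sort_paths_by_hints(paths, hints):
--     hints_low = [h.lower() for h in hints]
--
--     def key(p):
--         norm = p.replace("\\", "/").lower()
--         return (not any(h in norm for h in hints_low), p)
--
--     return sorted(paths, key=key)
-- ===== Notes on version B (the rewrite author's own statement) =====
-- stated objective: simpler
-- what changed: Replaced the partition-into-two-lists plus two separate sorts (and the special empty-hints branch) by a single sorted() call with a lexicographic key (not matched, path), which puts matched paths first and orders each group by path.
import Mathlib
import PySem

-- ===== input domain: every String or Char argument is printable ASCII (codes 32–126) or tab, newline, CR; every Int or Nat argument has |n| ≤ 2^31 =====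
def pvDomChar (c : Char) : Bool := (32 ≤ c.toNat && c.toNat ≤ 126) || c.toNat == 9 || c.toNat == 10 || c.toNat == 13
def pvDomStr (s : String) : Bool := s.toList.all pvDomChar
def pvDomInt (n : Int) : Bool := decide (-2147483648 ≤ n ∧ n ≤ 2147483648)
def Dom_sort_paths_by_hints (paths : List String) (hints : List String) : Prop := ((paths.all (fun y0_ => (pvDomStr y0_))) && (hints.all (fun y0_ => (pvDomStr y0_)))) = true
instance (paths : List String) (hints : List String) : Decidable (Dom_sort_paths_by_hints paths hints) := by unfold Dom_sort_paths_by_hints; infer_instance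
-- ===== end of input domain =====

-- B replaces A's partition-into-two-lists plus two sorts (and the empty-hints branch) by one
-- sorted() call with the lexicographic key (not matched, path); simpler, same cost.


-- ===== PORT A =====
def normalize_path (path : String) : String :=
  PySem.Str.lower (PySem.Str.replace path "\\" "/")

def sort_paths_by_hints (paths : List String) (hints : List String) : List String :=
  if hints = [] then PySem.List.sorted paths (fun x => x) false
  else
    let hints_low := hints.map (fun h => PySem.Str.lower h)
    let po := paths.foldl (fun (acc : List String × List String) path =>
        let norm := normalize_path path
        if hints_low.any (fun h => PySem.Str.isIn h norm) then (acc.1 ++ [path], acc.2)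
        else (acc.1, acc.2 ++ [path])) ([], [])
    PySem.List.sorted po.1 (fun x => x) false ++ PySem.List.sorted po.2 (fun x => x) false

-- ===== PORT B =====
def sort_paths_by_hints_alt (paths : List String) (hints : List String) : List String :=
  let hints_low := hints.map (fun h => PySem.Str.lower h)
  PySem.List.sorted2 paths
    (fun p => !(hints_low.any (fun h => PySem.Str.isIn h (PySem.Str.lower (PySem.Str.replace p "\\" "/")))))
    (fun p => p) false

-- ===== PRECONDITION & SPEC =====
def Spec_sort_paths_by_hints (paths : List String) (hints : List String) (out : List String) : Prop := out = sort_paths_by_hints_alt paths hints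
instance (paths : List String) (hints : List String) (out : List String) : Decidable (Spec_sort_paths_by_hints paths hints out) := by unfold Spec_sort_paths_by_hints; infer_instance

-- ===== CLAIM (what is proved, stated in full; the proofs are below) =====
def Claim_equal_sort_paths_by_hints : Prop := ∀ (paths : List String) (hints : List String), Dom_sort_paths_by_hints paths hints → Spec_sort_paths_by_hints paths hints (sort_paths_by_hints paths hints)

-- ===== LEMMAS AND PROOFS =====

lemma insertBy_split_false (k1 : String → Bool) (x : String) (hx : k1 x = false)
    (accF accT : List String) (hF : ∀ y ∈ accF, k1 y = false) (hT : ∀ y ∈ accT, k1 y = true) :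
    PySem.List.insertBy (fun a b => decide (k1 a < k1 b) || (!decide (k1 b < k1 a) && decide (a.toList < b.toList))) x (accF ++ accT)
      = PySem.List.insertBy (fun a b => decide (a.toList < b.toList)) x accF ++ accT := by
  induction accF with
  | nil =>
    simp only [List.nil_append, PySem.List.insertBy]
    cases accT with
    | nil => rfl
    | cons y ys =>
      have hy : k1 y = true := hT y (by simp)
      simp [PySem.List.insertBy, hx, hy]
  | cons y ys ih =>
    have hy : k1 y = false := hF y (by simp)
    by_cases hlt : x.toList < y.toList
    · simp [PySem.List.insertBy, hx, hy, hlt]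
    · simp [PySem.List.insertBy, hx, hy, hlt,
        ih (fun z hz => hF z (by simp [hz]))]

lemma insertBy_split_true (k1 : String → Bool) (x : String) (hx : k1 x = true)
    (accF accT : List String) (hF : ∀ y ∈ accF, k1 y = false) (hT : ∀ y ∈ accT, k1 y = true) :
    PySem.List.insertBy (fun a b => decide (k1 a < k1 b) || (!decide (k1 b < k1 a) && decide (a.toList < b.toList))) x (accF ++ accT)
      = accF ++ PySem.List.insertBy (fun a b => decide (a.toList < b.toList)) x accT := by
  induction accF with
  | nil =>
    simp only [List.nil_append]
    induction accT with
    | nil => rfl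
    | cons y ys ihT =>
      have hy : k1 y = true := hT y (by simp)
      by_cases hlt : x.toList < y.toList
      · simp [PySem.List.insertBy, hx, hy, hlt]
      · simp [PySem.List.insertBy, hx, hy, hlt,
          ihT (fun z hz => hT z (by simp [hz]))]
  | cons y ys ih =>
    have hy : k1 y = false := hF y (by simp)
    simp [PySem.List.insertBy, hx, hy,
      ih (fun z hz => hF z (by simp [hz]))]

lemma foldl_insertBy_split (k1 : String → Bool) (xs : List String) :
    ∀ (accF accT : List String), (∀ y ∈ accF, k1 y = false) → (∀ y ∈ accT, k1 y = true) →
    xs.foldl (fun acc x => PySem.List.insertBy (fun a b => decide (k1 a < k1 b) || (!decide (k1 b < k1 a) && decide (a.toList < b.toList))) x acc) (accF ++ accT)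
      = (xs.filter (fun x => !k1 x)).foldl
          (fun acc x => PySem.List.insertBy (fun a b => decide (a.toList < b.toList)) x acc) accF
        ++ (xs.filter (fun x => k1 x)).foldl
          (fun acc x => PySem.List.insertBy (fun a b => decide (a.toList < b.toList)) x acc) accT := by
  induction xs with
  | nil => intro accF accT _ _; simp
  | cons x xs ih =>
    intro accF accT hF hT
    cases hx : k1 x with
    | false =>
      have h1 := insertBy_split_false k1 x hx accF accT hF hT
      have hF' : ∀ y ∈ PySem.List.insertBy (fun a b => decide (a.toList < b.toList)) x accF, k1 y = false := by
        intro y hy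
        rcases (PySem.List.mem_insertBy _ _ _ _).1 hy with h | h
        · simpa [h] using hx
        · exact hF y h
      simp only [List.foldl_cons, h1, List.filter_cons, hx]
      simpa using ih (PySem.List.insertBy (fun a b => decide (a.toList < b.toList)) x accF) accT hF' hT
    | true =>
      have h1 := insertBy_split_true k1 x hx accF accT hF hT
      have hT' : ∀ y ∈ PySem.List.insertBy (fun a b => decide (a.toList < b.toList)) x accT, k1 y = true := by
        intro y hy
        rcases (PySem.List.mem_insertBy _ _ _ _).1 hy with h | h
        · simpa [h] using hx
        · exact hT y h
      simp only [List.foldl_cons, h1, List.filter_cons, hx]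
      simpa using ih accF (PySem.List.insertBy (fun a b => decide (a.toList < b.toList)) x accT) hF hT'

-- sorted2 with a Bool first key is the two-group splitting A performs
lemma sorted2_bool_split (k1 : String → Bool) (xs : List String) :
    PySem.List.sorted2 xs k1 (fun p => p) false
      = PySem.List.sorted (xs.filter (fun x => !k1 x)) (fun p => p) false
        ++ PySem.List.sorted (xs.filter (fun x => k1 x)) (fun p => p) false := by
  have h := foldl_insertBy_split k1 xs [] [] (by simp) (by simp)
  simpa [PySem.List.sorted2, PySem.List.sorted] using h

-- A's partition loop builds the two filters
lemma partition_foldl (m : String → Bool) (xs : List String) :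
    ∀ (accP accO : List String),
    xs.foldl (fun (acc : List String × List String) path =>
        if m path then (acc.1 ++ [path], acc.2) else (acc.1, acc.2 ++ [path])) (accP, accO)
      = (accP ++ xs.filter m, accO ++ xs.filter (fun p => !m p)) := by
  induction xs with
  | nil => intro accP accO; simp
  | cons x xs ih =>
    intro accP accO
    cases hx : m x <;> simp [hx, ih]

-- ===== VERDICT (by name: the statement is the Claim_ definition above) =====
theorem sort_paths_by_hints_spec : Claim_equal_sort_paths_by_hints := by
  intro paths hints _
  unfold Spec_sort_paths_by_hints
  simp only [sort_paths_by_hints, sort_paths_by_hints_alt]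
  by_cases hh : hints = []
  · subst hh
    rw [if_pos rfl, sorted2_bool_split]
    simp [PySem.List.sorted]
  · rw [if_neg hh]
    rw [partition_foldl (fun path => (hints.map (fun h => PySem.Str.lower h)).any
        (fun h => PySem.Str.isIn h (normalize_path path))) paths [] [],
      sorted2_bool_split]
    simp [normalize_path]
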